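-- pv_equiv track=rewrite | github.com/paulross24/pumpkin-v3 | pumpkin/observe.py | _classify_services
-- ===== SOURCE A (Python) =====
-- from typing import Any, Dict, Iterable, List, Optional, Tuple
--
-- def _classify_services(open_ports: List[int], services: List[Dict[str, Any]]) -> List[str]:
--     hints: List[str] = []
--     if 8123 in open_ports:
--         hints.append("homeassistant")
--     if 554 in open_ports or 8554 in open_ports:
--         hints.append("rtsp_camera")
--     if 8008 in open_ports or 8009 in open_ports:
--         hints.append("chromecast")
--     if 1400 in open_ports:
--         hints.append("sonos")
--     if 62078 in open_ports:
--         hints.append("airplay")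
--     if 9100 in open_ports:
--         hints.append("printer")
--     if 22 in open_ports:
--         hints.append("ssh")
--     for service in services:
--         if service.get("type") in {"http", "https"} and service.get("title"):
--             hints.append(f"http:{service['title']}")
--     return sorted(set(hints))
-- ===== SOURCE B (Python) =====
-- _PORT_HINTS = {
--     8123: "homeassistant",
--     554: "rtsp_camera",
--     8554: "rtsp_camera",
--     8008: "chromecast",
--     8009: "chromecast",
--     1400: "sonos",
--     62078: "airplay",
--     9100: "printer",
--     22: "ssh",
-- }
--
-- def _classify_services(open_ports, services):
--     hints = set()
--     for port in open_ports:
--         hint = _PORT_HINTS.get(port)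
--         if hint is not None:
--             hints.add(hint)
--     for service in services:
--         if service.get("type") in {"http", "https"} and service.get("title"):
--             hints.add(f"http:{service['title']}")
--     return sorted(hints)
-- ===== Notes on version B (the rewrite author's own statement) =====
-- stated objective: idiomatic
-- what changed: A runs seven hard-coded membership tests (nine scans of open_ports) and dedups a list at the end; B walks open_ports once, looking each port up in a constant port-to-hint table and accumulating hints in a set from the start.
import Mathlib
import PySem

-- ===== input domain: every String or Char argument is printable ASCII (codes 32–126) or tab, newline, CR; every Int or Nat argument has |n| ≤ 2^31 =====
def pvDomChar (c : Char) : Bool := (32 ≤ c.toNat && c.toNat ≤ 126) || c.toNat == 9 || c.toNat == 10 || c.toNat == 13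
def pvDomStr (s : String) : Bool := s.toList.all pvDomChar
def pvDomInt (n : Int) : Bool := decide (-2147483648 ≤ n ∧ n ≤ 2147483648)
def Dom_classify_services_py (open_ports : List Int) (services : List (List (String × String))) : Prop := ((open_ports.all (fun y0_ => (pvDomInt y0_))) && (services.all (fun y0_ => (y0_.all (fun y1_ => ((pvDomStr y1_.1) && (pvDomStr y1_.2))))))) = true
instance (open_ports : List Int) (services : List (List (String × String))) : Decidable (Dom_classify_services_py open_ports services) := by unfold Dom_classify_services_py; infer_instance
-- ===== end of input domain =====

-- B replaces A's seven hard-coded membership tests with one pass over open_ports through a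
-- constant port→hint table, accumulating into a set; output (sorted, deduped) is identical.


-- shared transliteration of the per-service test both Pythons perform:
-- service.get("type") in {"http","https"} and truthy service.get("title")
-- (values are strings here, so 'truthy title' is exactly 'get("title") with default "" is nonempty')
def pvSvcCond (s : List (String × String)) : Bool :=
  ((PySem.Dict.mk s).get? "type" == some "http" || (PySem.Dict.mk s).get? "type" == some "https")
    && (((PySem.Dict.mk s).get? "title").getD "" != "")

def pvSvcTitle (s : List (String × String)) : String :=
  ((PySem.Dict.mk s).get? "title").getD ""

-- ===== PORT A =====
-- A's seven if-checks, building 'hints' in order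
def pvHints7 (open_ports : List Int) : List String :=
  let hints : List String := []
  let hints := if open_ports.contains 8123 then hints ++ ["homeassistant"] else hints
  let hints := if open_ports.contains 554 || open_ports.contains 8554 then hints ++ ["rtsp_camera"] else hints
  let hints := if open_ports.contains 8008 || open_ports.contains 8009 then hints ++ ["chromecast"] else hints
  let hints := if open_ports.contains 1400 then hints ++ ["sonos"] else hints
  let hints := if open_ports.contains 62078 then hints ++ ["airplay"] else hints
  let hints := if open_ports.contains 9100 then hints ++ ["printer"] else hints
  if open_ports.contains 22 then hints ++ ["ssh"] else hints

-- one step of A's 'for service in services' loop: conditional append to the hints list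
def pvSvcStepA (h : List String) (s : List (String × String)) : List String :=
  if pvSvcCond s then h ++ ["http:" ++ pvSvcTitle s] else h

def classify_services_py (open_ports : List Int) (services : List (List (String × String))) : List String :=
  PySem.List.sorted (PySem.Set.ofList (services.foldl pvSvcStepA (pvHints7 open_ports))) (fun x => x) false

-- ===== PORT B =====
def pvPortHints : PySem.Dict Int String := PySem.Dict.mk
  [(8123, "homeassistant"), (554, "rtsp_camera"), (8554, "rtsp_camera"),
   (8008, "chromecast"), (8009, "chromecast"), (1400, "sonos"),
   (62078, "airplay"), (9100, "printer"), (22, "ssh")]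

-- one step of B's 'for port in open_ports' loop: table lookup, add to the set on a hit
def pvPortStepB (s : PySem.Set String) (p : Int) : PySem.Set String :=
  match pvPortHints.get? p with
  | some h => PySem.Set.add s h
  | none => s

-- one step of B's 'for service in services' loop: conditional add to the set
def pvSvcStepB (acc : PySem.Set String) (s : List (String × String)) : PySem.Set String :=
  if pvSvcCond s then PySem.Set.add acc ("http:" ++ pvSvcTitle s) else acc

def classify_services_py_alt (open_ports : List Int) (services : List (List (String × String))) : List String :=
  PySem.List.sorted (services.foldl pvSvcStepB (open_ports.foldl pvPortStepB PySem.Set.empty)) (fun x => x) false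

-- ===== PRECONDITION & SPEC =====
def Spec_classify_services_py (open_ports : List Int) (services : List (List (String × String))) (out : List String) : Prop := out = classify_services_py_alt open_ports services
instance (open_ports : List Int) (services : List (List (String × String))) (out : List String) : Decidable (Spec_classify_services_py open_ports services out) := by unfold Spec_classify_services_py; infer_instance

-- ===== CLAIM (what is proved, stated in full; the proofs are below) =====
def Claim_equal_classify_services_py : Prop := ∀ (open_ports : List Int) (services : List (List (String × String))), Dom_classify_services_py open_ports services → Spec_classify_services_py open_ports services (classify_services_py open_ports services)

-- ===== LEMMAS AND PROOFS =====

lemma mem_foldl_svcA (svc : List (List (String × String))) (h : List String) (x : String) :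
    x ∈ svc.foldl pvSvcStepA h ↔
      x ∈ h ∨ ∃ s ∈ svc, pvSvcCond s = true ∧ x = "http:" ++ pvSvcTitle s := by
  induction svc generalizing h with
  | nil => simp
  | cons s rest ih =>
    simp only [List.foldl_cons, ih, List.mem_cons]
    by_cases hc : pvSvcCond s = true
    · simp only [pvSvcStepA, hc, if_true, List.mem_append, List.mem_singleton]
      constructor
      · rintro ((hx|hx)|⟨a,ha,hh⟩)
        · exact Or.inl hx
        · exact Or.inr ⟨s, Or.inl rfl, hc, hx⟩
        · exact Or.inr ⟨a, Or.inr ha, hh⟩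
      · rintro (hx|⟨a,(rfl|ha),hh⟩)
        · exact Or.inl (Or.inl hx)
        · exact Or.inl (Or.inr hh.2)
        · exact Or.inr ⟨a, ha, hh⟩
    · simp only [pvSvcStepA, hc]
      constructor
      · rintro (hx|⟨a,ha,hh⟩)
        · exact Or.inl hx
        · exact Or.inr ⟨a, Or.inr ha, hh⟩
      · rintro (hx|⟨a,(rfl|ha),hh⟩)
        · exact Or.inl hx
        · exact absurd hh.1 hc
        · exact Or.inr ⟨a, ha, hh⟩

lemma mem_foldl_svcB (svc : List (List (String × String))) (acc : PySem.Set String) (x : String) :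
    x ∈ svc.foldl pvSvcStepB acc ↔
      x ∈ acc ∨ ∃ s ∈ svc, pvSvcCond s = true ∧ x = "http:" ++ pvSvcTitle s := by
  induction svc generalizing acc with
  | nil => simp
  | cons s rest ih =>
    simp only [List.foldl_cons, ih, List.mem_cons]
    by_cases hc : pvSvcCond s = true
    · simp only [pvSvcStepB, hc, if_true, PySem.Set.mem_add]
      constructor
      · rintro ((hx|hx)|⟨a,ha,hh⟩)
        · exact Or.inl hx
        · exact Or.inr ⟨s, Or.inl rfl, hc, hx⟩
        · exact Or.inr ⟨a, Or.inr ha, hh⟩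
      · rintro (hx|⟨a,(rfl|ha),hh⟩)
        · exact Or.inl (Or.inl hx)
        · exact Or.inl (Or.inr hh.2)
        · exact Or.inr ⟨a, ha, hh⟩
    · simp only [pvSvcStepB, hc]
      constructor
      · rintro (hx|⟨a,ha,hh⟩)
        · exact Or.inl hx
        · exact Or.inr ⟨a, Or.inr ha, hh⟩
      · rintro (hx|⟨a,(rfl|ha),hh⟩)
        · exact Or.inl hx
        · exact absurd hh.1 hc
        · exact Or.inr ⟨a, ha, hh⟩

lemma nodup_foldl_svcB (svc : List (List (String × String))) (acc : PySem.Set String)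
    (h : acc.Nodup) : (svc.foldl pvSvcStepB acc).Nodup := by
  induction svc generalizing acc with
  | nil => exact h
  | cons s rest ih =>
    refine ih _ ?_
    unfold pvSvcStepB
    split
    · exact PySem.Set.nodup_add _ _ h
    · exact h

lemma mem_foldl_portB (l : List Int) (s : PySem.Set String) (x : String) :
    x ∈ l.foldl pvPortStepB s ↔ x ∈ s ∨ ∃ p ∈ l, pvPortHints.get? p = some x := by
  induction l generalizing s with
  | nil => simp
  | cons p rest ih =>
    cases hp : pvPortHints.get? p with
    | none =>
      simp only [List.foldl_cons, pvPortStepB, hp, ih, List.mem_cons]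
      constructor
      · rintro (hx|⟨a,ha,hh⟩)
        · exact Or.inl hx
        · exact Or.inr ⟨a, Or.inr ha, hh⟩
      · rintro (hx|⟨a,(rfl|ha),hh⟩)
        · exact Or.inl hx
        · rw [hp] at hh; cases hh
        · exact Or.inr ⟨a, ha, hh⟩
    | some y =>
      simp only [List.foldl_cons, pvPortStepB, hp, ih, PySem.Set.mem_add, List.mem_cons]
      constructor
      · rintro ((hx|hx)|⟨a,ha,hh⟩)
        · exact Or.inl hx
        · exact Or.inr ⟨p, Or.inl rfl, by rw [hp, hx]⟩
        · exact Or.inr ⟨a, Or.inr ha, hh⟩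
      · rintro (hx|⟨a,(rfl|ha),hh⟩)
        · exact Or.inl (Or.inl hx)
        · rw [hp] at hh; cases hh; exact Or.inl (Or.inr rfl)
        · exact Or.inr ⟨a, ha, hh⟩

lemma nodup_foldl_portB (l : List Int) (s : PySem.Set String) (h : s.Nodup) :
    (l.foldl pvPortStepB s).Nodup := by
  induction l generalizing s with
  | nil => exact h
  | cons p rest ih =>
    refine ih _ ?_
    unfold pvPortStepB
    split
    · exact PySem.Set.nodup_add _ _ h
    · exact h

-- the table lookup, spelled out
set_option maxRecDepth 4096 in
lemma table_get_iff (p : Int) (x : String) :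
    pvPortHints.get? p = some x ↔
      (p = 8123 ∧ x = "homeassistant") ∨ ((p = 554 ∨ p = 8554) ∧ x = "rtsp_camera") ∨
      ((p = 8008 ∨ p = 8009) ∧ x = "chromecast") ∨ (p = 1400 ∧ x = "sonos") ∨
      (p = 62078 ∧ x = "airplay") ∨ (p = 9100 ∧ x = "printer") ∨ (p = 22 ∧ x = "ssh") := by
  simp only [pvPortHints, PySem.Dict.get?_mk_cons, beq_iff_eq]
  split_ifs with h1 h2 h3 h4 h5 h6 h7 h8 h9 <;> subst_eqs <;> (try simp_all) <;>
    first
    | exact eq_comm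
    | (simp only [show ({items := []} : PySem.Dict Int String).get? p = none from rfl,
        reduceCtorEq, false_iff]
       rintro (⟨rfl,-⟩|⟨(rfl|rfl),-⟩|⟨(rfl|rfl),-⟩|⟨rfl,-⟩|⟨rfl,-⟩|⟨rfl,-⟩|⟨rfl,-⟩) <;> simp_all)

-- membership in A's seven-if hint list, as one disjunction
lemma mem_hints7 (op : List Int) (x : String) :
    x ∈ pvHints7 op ↔
      ((8123:Int) ∈ op ∧ x = "homeassistant") ∨ (((554:Int) ∈ op ∨ (8554:Int) ∈ op) ∧ x = "rtsp_camera") ∨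
      (((8008:Int) ∈ op ∨ (8009:Int) ∈ op) ∧ x = "chromecast") ∨ ((1400:Int) ∈ op ∧ x = "sonos") ∨
      ((62078:Int) ∈ op ∧ x = "airplay") ∨ ((9100:Int) ∈ op ∧ x = "printer") ∨ ((22:Int) ∈ op ∧ x = "ssh") := by
  unfold pvHints7
  split_ifs <;> simp_all

-- B's single pass over open_ports collects exactly the same disjunction
lemma exists_table_iff (op : List Int) (x : String) :
    (∃ p ∈ op, pvPortHints.get? p = some x) ↔
      ((8123:Int) ∈ op ∧ x = "homeassistant") ∨ (((554:Int) ∈ op ∨ (8554:Int) ∈ op) ∧ x = "rtsp_camera") ∨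
      (((8008:Int) ∈ op ∨ (8009:Int) ∈ op) ∧ x = "chromecast") ∨ ((1400:Int) ∈ op ∧ x = "sonos") ∨
      ((62078:Int) ∈ op ∧ x = "airplay") ∨ ((9100:Int) ∈ op ∧ x = "printer") ∨ ((22:Int) ∈ op ∧ x = "ssh") := by
  constructor
  · rintro ⟨p, hp, hg⟩
    rw [table_get_iff] at hg
    rcases hg with ⟨rfl,rfl⟩|⟨(rfl|rfl),rfl⟩|⟨(rfl|rfl),rfl⟩|⟨rfl,rfl⟩|⟨rfl,rfl⟩|⟨rfl,rfl⟩|⟨rfl,rfl⟩ <;>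
      tauto
  · rintro (⟨h,rfl⟩|⟨(h|h),rfl⟩|⟨(h|h),rfl⟩|⟨h,rfl⟩|⟨h,rfl⟩|⟨h,rfl⟩|⟨h,rfl⟩)
    · exact ⟨8123, h, by decide⟩
    · exact ⟨554, h, by decide⟩
    · exact ⟨8554, h, by decide⟩
    · exact ⟨8008, h, by decide⟩
    · exact ⟨8009, h, by decide⟩
    · exact ⟨1400, h, by decide⟩
    · exact ⟨62078, h, by decide⟩
    · exact ⟨9100, h, by decide⟩
    · exact ⟨22, h, by decide⟩

-- ===== VERDICT (by name: the statement is the Claim_ definition above) =====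
theorem classify_services_py_spec : Claim_equal_classify_services_py := by
  intro op svc _
  unfold Spec_classify_services_py classify_services_py classify_services_py_alt
  apply PySem.List.sorted_eq_sorted_of_perm
  · exact fun a b h => h
  · rw [List.perm_ext_iff_of_nodup (PySem.Set.nodup_ofList _)
      (nodup_foldl_svcB _ _ (nodup_foldl_portB _ PySem.Set.empty List.nodup_nil))]
    intro x
    rw [PySem.Set.mem_ofList, mem_foldl_svcA, mem_foldl_svcB, mem_foldl_portB,
      mem_hints7, exists_table_iff]
    simp only [PySem.Set.empty, List.not_mem_nil, false_or]
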